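-- pv_equiv track=rewrite | github.com/pnkmem433/pnk_kdh | tasmota/Tasmota/lib/libesp32/berry/berry_port/be_strlib.py | be_splitname
-- ===== SOURCE A (Python) =====
-- def be_splitname(path):
--     """Return the extension portion of a path (from last '.' before end).
--
--     Returns the index into path where the extension starts, or len(path) if none.
--     """
--     end = len(path)
--     # find last '.'
--     p = end - 1
--     while p > 0 and path[p] != '.':
--         p -= 1
--     if p <= 0:
--         # no dot found or dot at start
--         if p == 0 and path[p] == '.':
--             return end
--         return end
--     # skip consecutive dots
--     q = p
--     while q > 0 and path[q] == '.':
--         q -= 1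
--     if (q == 0 and path[q] == '.') or path[q] == '/':
--         return end
--     return p
-- ===== SOURCE B (Python) =====
-- def be_splitname(path):
--     """Return the index where path's extension starts, or len(path) if none.
--
--     Single forward pass: track the last '.' seen and whether the dot-run it
--     ends is preceded by a usable (non-'/', non-start) character.
--     """
--     res = None      # index of last dot, if it starts a valid extension
--     run_ok = False  # is the current run of dots preceded by a usable char?
--     prev = None     # previous character
--     for i, c in enumerate(path):
--         if c == '.':
--             if prev != '.':
--                 run_ok = prev is not None and prev != '/'
--             res = i if run_ok else None
--         prev = c
--     return res if res is not None else len(path)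
-- ===== Notes on version B (the rewrite author's own statement) =====
-- stated objective: alternative
-- what changed: A scans the string backwards twice with index-decrementing while-loops (find last dot, then walk back over the dot run); B makes one forward pass with an accumulator tracking the last dot and whether its dot-run is preceded by a usable character.
import Mathlib
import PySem

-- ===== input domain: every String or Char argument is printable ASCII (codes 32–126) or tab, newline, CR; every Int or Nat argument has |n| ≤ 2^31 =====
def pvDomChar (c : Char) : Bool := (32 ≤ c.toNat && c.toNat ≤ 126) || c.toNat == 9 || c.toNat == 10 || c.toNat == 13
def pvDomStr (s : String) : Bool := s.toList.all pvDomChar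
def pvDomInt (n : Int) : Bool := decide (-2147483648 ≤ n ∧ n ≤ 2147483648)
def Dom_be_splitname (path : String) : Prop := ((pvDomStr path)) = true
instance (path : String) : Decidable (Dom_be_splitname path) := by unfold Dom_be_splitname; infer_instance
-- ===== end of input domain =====

-- B replaces A's two backward index-walking while-loops by one forward pass with an accumulator (objective: alternative decomposition, same cost).

-- ===== PORT A =====
-- while p > 0 and path[p] != '.': p -= 1   (the access path[p] is guarded by 0 < p < len, so .getD never supplies the out-of-range default)
def beSplitFindDot (l : List Char) (p : Int) : Int :=
  if 0 < p then
    if (PySem.List.pyGet? l p).getD ' ' ≠ '.' then beSplitFindDot l (p - 1) else p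
  else p
termination_by p.toNat
decreasing_by omega

-- while q > 0 and path[q] == '.': q -= 1
def beSplitSkipDots (l : List Char) (q : Int) : Int :=
  if 0 < q then
    if (PySem.List.pyGet? l q).getD ' ' = '.' then beSplitSkipDots l (q - 1) else q
  else q
termination_by q.toNat
decreasing_by omega

-- the straight-line code of A after the first loop (p is that loop's result)
def beSplitAfter (l : List Char) (p : Int) : Int :=
  if p ≤ 0 then
    if p = 0 ∧ (PySem.List.pyGet? l p).getD ' ' = '.' then (l.length : Int) else (l.length : Int)
  else
    if (beSplitSkipDots l p = 0 ∧ (PySem.List.pyGet? l (beSplitSkipDots l p)).getD ' ' = '.')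
        ∨ (PySem.List.pyGet? l (beSplitSkipDots l p)).getD ' ' = '/' then (l.length : Int)
    else p

def be_splitname (path : String) : Int :=
  beSplitAfter path.toList (beSplitFindDot path.toList ((path.toList.length : Int) - 1))

-- ===== PORT B =====
-- one step of B's forward loop body on the state (res, run_ok, prev)
def beSplitAltStep (st : Option Int × Bool × Option Char) (ic : Int × Char) :
    Option Int × Bool × Option Char :=
  if ic.2 = '.' then
    ((if (if st.2.2 = some '.' then st.2.1 else decide (st.2.2 ≠ none ∧ st.2.2 ≠ some '/'))
        then some ic.1 else none),
     (if st.2.2 = some '.' then st.2.1 else decide (st.2.2 ≠ none ∧ st.2.2 ≠ some '/')),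
     some ic.2)
  else (st.1, st.2.1, some ic.2)

def be_splitname_alt (path : String) : Int :=
  match ((PySem.List.enumerate path.toList 0).foldl beSplitAltStep (none, false, none)).1 with
  | some p => p
  | none => (path.toList.length : Int)

-- ===== PRECONDITION & SPEC =====
def Spec_be_splitname (path : String) (out : Int) : Prop := out = be_splitname_alt path
instance (path : String) (out : Int) : Decidable (Spec_be_splitname path out) := by unfold Spec_be_splitname; infer_instance

-- ===== CLAIM (what is proved, stated in full; the proofs are below) =====
def Claim_equal_be_splitname : Prop := ∀ (path : String), Dom_be_splitname path → Spec_be_splitname path (be_splitname path)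

-- ===== LEMMAS AND PROOFS =====

-- index of the last character of l satisfying p, if any
def lastP (p : Char → Bool) : List Char → Option Nat
  | [] => none
  | c :: cs => match lastP p cs with
    | some j => some (j + 1)
    | none => if p c then some 0 else none

def isDot (c : Char) : Bool := c == '.'
def notDot (c : Char) : Bool := c != '.'

-- the common characterisation: index where the extension starts, if any
def extSpec (l : List Char) : Option Nat :=
  match lastP isDot l with
  | none => none
  | some p =>
    if p = 0 then none
    else match lastP notDot (l.take p) with
      | none => none
      | some j => if l.getD j ' ' = '/' then none else some p

def outOf (o : Option Nat) (n : Nat) : Int :=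
  match o with
  | some p => (p : Int)
  | none => (n : Int)

theorem lastP_concat (p : Char → Bool) (l : List Char) (c : Char) :
    lastP p (l ++ [c]) = if p c then some l.length else lastP p l := by
  induction l with
  | nil => cases hc : p c <;> simp [lastP, hc]
  | cons d ds ih =>
    simp only [List.cons_append, lastP, ih]
    cases hc : p c
    · simp
    · simp

theorem lastP_lt {p : Char → Bool} {l : List Char} {j : Nat}
    (h : lastP p l = some j) : j < l.length := by
  induction l generalizing j with
  | nil => simp [lastP] at h
  | cons c cs ih =>
    simp only [lastP] at h
    cases hcs : lastP p cs with
    | some k => rw [hcs] at h; simp at h; subst h; have := ih hcs; simp; omega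
    | none =>
      rw [hcs] at h
      cases hc : p c
      · simp [hc] at h
      · simp [hc] at h; subst h; simp

theorem lastP_sat {p : Char → Bool} {l : List Char} {j : Nat}
    (h : lastP p l = some j) : p (l.getD j ' ') = true := by
  induction l generalizing j with
  | nil => simp [lastP] at h
  | cons c cs ih =>
    simp only [lastP] at h
    cases hcs : lastP p cs with
    | some k => rw [hcs] at h; simp at h; subst h; simpa using ih hcs
    | none =>
      rw [hcs] at h
      cases hc : p c
      · simp [hc] at h
      · simp [hc] at h; subst h; simpa using hc

theorem lastP_none {p : Char → Bool} {l : List Char}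
    (h : lastP p l = none) : ∀ i < l.length, p (l.getD i ' ') = false := by
  induction l with
  | nil => intro i hi; simp at hi
  | cons c cs ih =>
    simp only [lastP] at h
    cases hcs : lastP p cs with
    | some k => rw [hcs] at h; simp at h
    | none =>
      rw [hcs] at h
      cases hc : p c
      · intro i hi
        cases i with
        | zero => simpa using hc
        | succ i => simp at hi ⊢; exact ih hcs i (by omega)
      · simp [hc] at h

theorem lastP_getLast {p : Char → Bool} {l : List Char} {c : Char}
    (h : l.getLast? = some c) (hc : p c = true) :
    lastP p l = some (l.length - 1) := by
  have hne : l ≠ [] := by intro h0; simp [h0] at h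
  have hl : l.dropLast ++ [l.getLast hne] = l := List.dropLast_concat_getLast hne
  have hcl : l.getLast hne = c := by
    have := List.getLast?_eq_some_getLast (l := l) hne
    rw [this] at h; exact Option.some.inj h
  conv_lhs => rw [← hl]
  rw [lastP_concat, hcl, hc]
  simp only [if_true]
  have : l.dropLast.length = l.length - 1 := by simp
  rw [this]

-- pyGet? at a valid natural index
theorem pyGetD_nat (l : List Char) (j : Nat) (hj : j < l.length) :
    (PySem.List.pyGet? l (j : Int)).getD ' ' = l.getD j ' ' := by
  rw [PySem.List.pyGet?_natCast]
  simp [List.getD_eq_getElem?_getD]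

theorem take_succ_getD (l : List Char) (k : Nat) (hk : k < l.length) :
    l.take (k + 1) = l.take k ++ [l.getD k ' '] := by
  rw [List.take_add_one]
  congr 1
  have : l[k]? = some (l.getD k ' ') := by
    rw [List.getD_eq_getElem?_getD]
    cases h : l[k]? with
    | none => rw [List.getElem?_eq_none_iff] at h; omega
    | some x => simp
  rw [this]; rfl

theorem getD_append_left (l t : List Char) (j : Nat) (hj : j < l.length) :
    (l ++ t).getD j ' ' = l.getD j ' ' := by
  rw [List.getD_eq_getElem?_getD, List.getD_eq_getElem?_getD, List.getElem?_append_left hj]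

-- ===== A equals the characterisation =====

theorem findDot_eq (l : List Char) (k : Nat) (hk : k < l.length) :
    beSplitFindDot l (k : Int) =
      match lastP isDot (l.take (k + 1)) with
      | some p => if p = 0 then 0 else (p : Int)
      | none => 0 := by
  induction k with
  | zero =>
    have h1 : l.take 1 = [l.getD 0 ' '] := by
      cases l with
      | nil => simp at hk
      | cons c cs => simp [List.getD]
    rw [show ((0:Nat):Int) = 0 by simp, beSplitFindDot,
        if_neg (by omega : ¬ (0:Int) < 0), h1]
    simp only [lastP]
    cases hd : isDot (l.getD 0 ' ') <;> simp [hd]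
  | succ k ih =>
    have hk' : k < l.length := by omega
    rw [beSplitFindDot]
    have hpos : (0:Int) < ((k+1 : Nat) : Int) := by push_cast; omega
    rw [if_pos hpos]
    have hget : (PySem.List.pyGet? l ((k+1 : Nat) : Int)).getD ' ' = l.getD (k+1) ' ' :=
      pyGetD_nat l (k+1) hk
    rw [take_succ_getD l (k+1) hk, lastP_concat]
    cases hd : isDot (l.getD (k+1) ' ')
    · have hne : (PySem.List.pyGet? l ((k+1 : Nat) : Int)).getD ' ' ≠ '.' := by
        rw [hget]; simpa [isDot] using hd
      rw [if_pos hne]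
      simp only [Bool.false_eq_true, if_false]
      have hc : ((k+1 : Nat) : Int) - 1 = (k : Int) := by push_cast; ring
      rw [hc]
      exact ih hk'
    · have heq : ¬ ((PySem.List.pyGet? l ((k+1 : Nat) : Int)).getD ' ' ≠ '.') := by
        rw [hget]; simpa [isDot] using hd
      rw [if_neg heq]
      simp only [if_true]
      have hlen : (l.take (k+1)).length = k + 1 := by simp; omega
      rw [hlen]
      simp

theorem skipDots_eq (l : List Char) (q : Nat) (hq : q < l.length)
    (hd : l.getD q ' ' = '.') :
    beSplitSkipDots l (q : Int) = (((lastP notDot (l.take q)).getD 0 : Nat) : Int) := by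
  induction q with
  | zero =>
    rw [show ((0:Nat):Int) = 0 by simp, beSplitSkipDots,
        if_neg (by omega : ¬ (0:Int) < 0)]
    rfl
  | succ q ih =>
    have hpos : (0:Int) < ((q+1 : Nat) : Int) := by push_cast; omega
    rw [beSplitSkipDots, if_pos hpos]
    have hget : (PySem.List.pyGet? l ((q+1 : Nat) : Int)).getD ' ' = l.getD (q+1) ' ' :=
      pyGetD_nat l (q+1) hq
    rw [if_pos (by rw [hget]; exact hd)]
    have hq' : q < l.length := by omega
    have hcast : ((q+1 : Nat) : Int) - 1 = (q : Int) := by push_cast; ring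
    rw [hcast, take_succ_getD l q hq', lastP_concat]
    cases hnd : notDot (l.getD q ' ')
    · -- previous char is also a dot: recurse
      simp only [Bool.false_eq_true, if_false]
      have hdq : l.getD q ' ' = '.' := by simpa [notDot] using hnd
      exact ih hq' hdq
    · -- previous char is not a dot: the loop stops at q
      simp only [if_true]
      have hlen : (l.take q).length = q := by simp; omega
      rw [hlen]
      rw [beSplitSkipDots]
      by_cases h0 : (0:Int) < (q : Int)
      · rw [if_pos h0]
        have hne : ¬ ((PySem.List.pyGet? l (q : Int)).getD ' ' = '.') := by
          rw [pyGetD_nat l q hq']; simpa [notDot] using hnd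
        rw [if_neg hne]
        simp
      · rw [if_neg h0]
        have : q = 0 := by omega
        simp [this]

theorem A_eq_spec (path : String) :
    be_splitname path = outOf (extSpec path.toList) path.toList.length := by
  unfold be_splitname
  rcases eq_or_ne path.toList [] with hl | hne
  · rw [hl]
    rw [show ((([]:List Char).length : Int) - 1) = -1 by simp]
    rw [beSplitFindDot, if_neg (by omega : ¬ (0:Int) < -1)]
    rw [beSplitAfter, if_pos (by omega : (-1:Int) ≤ 0),
        if_neg (by simp : ¬ ((-1:Int) = 0 ∧ (PySem.List.pyGet? ([]:List Char) (-1)).getD ' ' = '.'))]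
    rfl
  · set l := path.toList with hldef
    have hlen1 : 0 < l.length := List.length_pos_of_ne_nil hne
    have hcast : ((l.length : Int) - 1) = ((l.length - 1 : Nat) : Int) := by omega
    rw [hcast, findDot_eq l (l.length - 1) (by omega)]
    have htake : l.take (l.length - 1 + 1) = l := by
      rw [show l.length - 1 + 1 = l.length by omega]; simp
    rw [htake]
    cases hlp : lastP isDot l with
    | none =>
      simp only [hlp]
      rw [beSplitAfter, if_pos le_rfl, ite_self]
      simp [extSpec, hlp, outOf]
    | some p =>
      simp only [hlp]
      by_cases hp0 : p = 0
      · subst hp0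
        rw [if_pos rfl, beSplitAfter, if_pos le_rfl, ite_self]
        simp [extSpec, hlp, outOf]
      · rw [if_neg hp0]
        have hplt : p < l.length := lastP_lt hlp
        have hpdot : l.getD p ' ' = '.' := by
          have := lastP_sat hlp; simpa [isDot] using this
        have hppos : ¬ ((p : Int) ≤ 0) := by
          push_cast
          omega
        rw [beSplitAfter, if_neg hppos]
        rw [skipDots_eq l p hplt hpdot]
        cases hlq : lastP notDot (l.take p) with
        | none =>
          -- everything below index p is a dot, in particular l[0]
          have h0 : l.getD 0 ' ' = '.' := by
            have h0' : (l.take p).getD 0 ' ' = l.getD 0 ' ' := by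
              rw [List.getD_eq_getElem?_getD, List.getD_eq_getElem?_getD,
                  List.getElem?_take_of_lt (by omega)]
            have := lastP_none hlq 0 (by simp; omega)
            rw [h0'] at this
            simpa [notDot] using this
          have hg0 : (PySem.List.pyGet? l (0:Int)).getD ' ' = l.getD 0 ' ' := by
            simpa using pyGetD_nat l 0 (by omega)
          simp only [hlq, Option.getD_none, Nat.cast_zero]
          rw [if_pos (Or.inl ⟨by norm_num, by rw [hg0]; exact h0⟩)]
          simp [extSpec, hlp, if_neg hp0, hlq, outOf]
        | some j =>
          have hjlt : j < (l.take p).length := lastP_lt hlq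
          have hjp : j < p := by simp at hjlt; omega
          have hjl : j < l.length := by omega
          have hjnd : l.getD j ' ' ≠ '.' := by
            have h0' : (l.take p).getD j ' ' = l.getD j ' ' := by
              rw [List.getD_eq_getElem?_getD, List.getD_eq_getElem?_getD,
                  List.getElem?_take_of_lt hjp]
            have := lastP_sat hlq
            rw [h0'] at this
            simpa [notDot] using this
          have hgj : (PySem.List.pyGet? l ((j:Nat):Int)).getD ' ' = l.getD j ' ' :=
            pyGetD_nat l j hjl
          simp only [hlq, Option.getD_some]
          simp only [hgj]
          have hrhs : extSpec l = if l.getD j ' ' = '/' then none else some p := by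
            unfold extSpec
            rw [hlp]
            dsimp only
            rw [if_neg hp0, hlq]
          by_cases hs : l.getD j ' ' = '/'
          · rw [if_pos (Or.inr hs), hrhs, if_pos hs]
            rfl
          · rw [if_neg (by rintro (⟨-, h2⟩ | h2); exacts [hjnd h2, hs h2]), hrhs, if_neg hs]
            rfl

-- ===== B equals the characterisation =====

-- run_ok's meaning: the dot-run now ending is preceded by a usable character
def runOkSpec (l : List Char) : Bool :=
  match lastP notDot l with
  | none => false
  | some j => decide (l.getD j ' ' ≠ '/')

theorem extSpec_concat_nondot (l : List Char) (c : Char) (hc : isDot c = false) :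
    extSpec (l ++ [c]) = extSpec l := by
  unfold extSpec
  rw [lastP_concat, hc]
  simp only [Bool.false_eq_true, if_false]
  cases hlp : lastP isDot l with
  | none => rfl
  | some p =>
    dsimp only
    by_cases hp0 : p = 0
    · simp [hp0]
    · have hplt : p < l.length := lastP_lt hlp
      rw [if_neg hp0, if_neg hp0, List.take_append_of_le_length (by omega)]
      cases hlq : lastP notDot (l.take p) with
      | none => rfl
      | some j =>
        dsimp only
        have hjlt : j < (l.take p).length := lastP_lt hlq
        have hjl : j < l.length := by simp at hjlt; omega
        rw [getD_append_left l [c] j hjl]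

theorem getD_getLast {l : List Char} {c : Char} (h : l.getLast? = some c) :
    l.getD (l.length - 1) ' ' = c := by
  rw [List.getD_eq_getElem?_getD, ← List.getLast?_eq_getElem?, h]
  rfl

theorem foldl_alt_inv (l : List Char) :
    ((PySem.List.enumerate l 0).foldl beSplitAltStep (none, false, none)).2.2 = l.getLast? ∧
    ((PySem.List.enumerate l 0).foldl beSplitAltStep (none, false, none)).1
        = (extSpec l).map (fun p => (p : Int)) ∧
    (l.getLast? = some '.' →
      ((PySem.List.enumerate l 0).foldl beSplitAltStep (none, false, none)).2.1 = runOkSpec l) := by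
  induction l using List.reverseRecOn with
  | nil => simp [PySem.List.enumerate, extSpec, lastP]
  | append_singleton l c ih =>
    obtain ⟨ihprev, ihres, ihok⟩ := ih
    have hstep : (PySem.List.enumerate (l ++ [c]) 0).foldl beSplitAltStep (none, false, none)
        = beSplitAltStep ((PySem.List.enumerate l 0).foldl beSplitAltStep (none, false, none))
            ((l.length : Int), c) := by
      rw [PySem.List.enumerate_append, List.foldl_append]
      simp [PySem.List.enumerate_cons, PySem.List.enumerate_nil]
    rw [hstep]
    by_cases hc : c = '.'
    · subst hc
      rw [beSplitAltStep, if_pos rfl]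
      have hrun : (if ((PySem.List.enumerate l 0).foldl beSplitAltStep (none, false, none)).2.2 = some '.'
              then ((PySem.List.enumerate l 0).foldl beSplitAltStep (none, false, none)).2.1
              else decide (((PySem.List.enumerate l 0).foldl beSplitAltStep (none, false, none)).2.2 ≠ none ∧
                           ((PySem.List.enumerate l 0).foldl beSplitAltStep (none, false, none)).2.2 ≠ some '/'))
            = runOkSpec l := by
        rw [ihprev]
        cases hlast : l.getLast? with
        | none =>
          have hnil : l = [] := List.getLast?_eq_none_iff.mp hlast
          subst hnil
          simp [runOkSpec, lastP]
        | some ch =>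
          by_cases hch : ch = '.'
          · subst hch
            rw [if_pos rfl]
            exact ihok hlast
          · rw [if_neg (by simp [hch])]
            have hnd : notDot ch = true := by simp [notDot, hch]
            have hlnd : lastP notDot l = some (l.length - 1) := lastP_getLast hlast hnd
            have hgd : l.getD (l.length - 1) ' ' = ch := getD_getLast hlast
            rw [runOkSpec, hlnd]
            dsimp only
            rw [hgd]
            simp
      rw [hrun]
      refine ⟨by simp, ?_, fun _ => ?_⟩
      · -- the result component
        have hexd : extSpec (l ++ ['.']) =
            (if l.length = 0 then none
             else match lastP notDot l with
               | none => none
               | some j => if l.getD j ' ' = '/' then none else some l.length) := by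
          unfold extSpec
          rw [lastP_concat]
          simp only [isDot, beq_self_eq_true, if_true]
          by_cases h0 : l.length = 0
          · simp [h0]
          · rw [if_neg h0, if_neg h0, List.take_left]
            cases hlq : lastP notDot l with
            | none => rfl
            | some j =>
              have hjl : j < l.length := lastP_lt hlq
              dsimp only
              rw [getD_append_left l ['.'] j hjl]
        rw [hexd]
        by_cases h0 : l.length = 0
        · have hnil : l = [] := List.length_eq_zero_iff.mp h0
          subst hnil
          simp [runOkSpec, lastP]
        · rw [if_neg h0]
          rw [runOkSpec]
          cases hlq : lastP notDot l with
          | none => simp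
          | some j =>
            dsimp only
            by_cases hs : l.getD j ' ' = '/'
            · rw [if_pos hs, if_neg (by rw [hs]; simp : ¬ (decide (l.getD j ' ' ≠ '/') = true))]
              rfl
            · rw [if_neg hs, if_pos (decide_eq_true hs : decide (l.getD j ' ' ≠ '/') = true)]
              rfl
      · -- run_ok component: runOkSpec (l ++ ['.']) = runOkSpec l
        rw [runOkSpec, runOkSpec, lastP_concat, show notDot '.' = false by simp [notDot]]
        simp only [Bool.false_eq_true, if_false]
        cases hlq : lastP notDot l with
        | none => rfl
        | some j =>
          have hjl : j < l.length := lastP_lt hlq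
          dsimp only
          rw [getD_append_left l ['.'] j hjl]
    · rw [beSplitAltStep, if_neg hc]
      refine ⟨by simp, ?_, fun hlast => ?_⟩
      · rw [ihres, extSpec_concat_nondot l c (by simp [isDot, hc])]
      · rw [List.getLast?_concat] at hlast
        exact absurd (Option.some.inj hlast) hc

theorem B_eq_spec (path : String) :
    be_splitname_alt path = outOf (extSpec path.toList) path.toList.length := by
  unfold be_splitname_alt
  rw [(foldl_alt_inv path.toList).2.1]
  cases extSpec path.toList <;> simp [outOf]

-- ===== VERDICT (by name: the statement is the Claim_ definition above) =====
theorem be_splitname_spec : Claim_equal_be_splitname := by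
  intro path _
  unfold Spec_be_splitname
  rw [A_eq_spec, B_eq_spec]
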